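-- pv_equiv track=rewrite | github.com/Divyam989/dna-storage-device | dna_logic.py | add_parity
-- ===== SOURCE A (Python) =====
-- def add_parity(dna: str) -> tuple[str, list[int]]:
--     """
--     Append a parity base after every 8-base block.
--     Parity rule (even parity on G/C count):
--         GC count even  → parity base = A
--         GC count odd   → parity base = T
--     Returns the new sequence and the list of parity base positions.
--     """
--     result = []
--     parity_positions = []
--     pos = 0
--     for i in range(0, len(dna), 8):
--         block = dna[i:i+8]
--         result.append(block)
--         pos += len(block)
--         gc = sum(1 for b in block if b in ("G", "C"))
--         parity_base = "A" if gc % 2 == 0 else "T"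
--         result.append(parity_base)
--         parity_positions.append(pos)
--         pos += 1
--     return "".join(result), parity_positions
-- ===== SOURCE B (Python) =====
-- def add_parity(dna: str) -> tuple[str, list[int]]:
--     """Single per-character pass: keep a running GC-parity flag and a block
--     counter; emit the parity base whenever 8 bases have been copied, and flush
--     the final partial block after the loop."""
--     out = []
--     positions = []
--     odd = False
--     cnt = 0
--     for ch in dna:
--         out.append(ch)
--         if ch == "G" or ch == "C":
--             odd = not odd
--         cnt += 1
--         if cnt == 8:
--             out.append("T" if odd else "A")
--             positions.append(len(out) - 1)
--             odd = False
--             cnt = 0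
--     if cnt > 0:
--         out.append("T" if odd else "A")
--         positions.append(len(out) - 1)
--     return "".join(out), positions
-- ===== Notes on version B (the rewrite author's own statement) =====
-- stated objective: alternative
-- what changed: Replaces the block-slicing loop (range step 8, per-block slice plus a generator-sum GC count and separate position counter) with a single per-character pass that maintains a running GC-parity flag and a block counter, flushing the final partial block after the loop.
import Mathlib
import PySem

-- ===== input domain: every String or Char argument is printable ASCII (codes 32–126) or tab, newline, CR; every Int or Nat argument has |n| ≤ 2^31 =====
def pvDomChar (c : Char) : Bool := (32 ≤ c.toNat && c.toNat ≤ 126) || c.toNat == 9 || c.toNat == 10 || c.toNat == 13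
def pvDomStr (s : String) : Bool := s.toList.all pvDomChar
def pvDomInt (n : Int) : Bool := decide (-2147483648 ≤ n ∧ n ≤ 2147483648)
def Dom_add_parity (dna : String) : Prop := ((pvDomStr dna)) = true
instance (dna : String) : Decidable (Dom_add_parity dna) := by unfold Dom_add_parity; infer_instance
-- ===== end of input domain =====

-- B replaces A's block-slicing loop by a single per-character pass with a running
-- GC-parity flag and a block counter (alternative decomposition, same O(n) cost).

-- ===== PORT A =====
-- strings are handled as their character lists; String.ofList at the very end (exact)

-- sum(1 for b in block if b in ("G", "C"))
def aGC (block : List Char) : Int :=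
  block.foldl (fun acc b => if b = 'G' ∨ b = 'C' then acc + 1 else acc) 0

-- one iteration of A's `for i in range(0, len(dna), 8)` loop body;
-- state = (result, parity_positions, pos)
def aStep (s : List Char) (st : List (List Char) × List Int × Int) (i : Int) :
    List (List Char) × List Int × Int :=
  let block := PySem.List.slice s (some i) (some (i + 8))
  let result := st.1 ++ [block]
  let pos := st.2.2 + (block.length : Int)
  let gc := aGC block
  let parity_base : List Char := if PySem.Int.mod gc 2 = 0 then ['A'] else ['T']
  (result ++ [parity_base], st.2.1 ++ [pos], pos + 1)

def add_parity (dna : String) : String × List Int :=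
  let s := dna.toList
  let st := (PySem.List.pyRange 0 (PySem.Str.len dna) 8).foldl (aStep s) ([], [], 0)
  (String.ofList (PySem.Chars.join [] st.1), st.2.1)

-- ===== PORT B =====
-- B's per-character loop; state = (out, positions, odd, cnt)
def bGo : List Char → List Char → List Int → Bool → Int → List Char × List Int
  | [], out, poss, odd, cnt =>
      if cnt > 0 then
        let out' := out ++ [if odd then 'T' else 'A']
        (out', poss ++ [(out'.length : Int) - 1])
      else (out, poss)
  | ch :: rest, out, poss, odd, cnt =>
      let out' := out ++ [ch]
      let odd' := if ch = 'G' ∨ ch = 'C' then !odd else odd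
      let cnt' := cnt + 1
      if cnt' = 8 then
        let out'' := out' ++ [if odd' then 'T' else 'A']
        bGo rest out'' (poss ++ [(out''.length : Int) - 1]) false 0
      else bGo rest out' poss odd' cnt'

def add_parity_alt (dna : String) : String × List Int :=
  let r := bGo dna.toList [] [] false 0
  (String.ofList r.1, r.2)

-- ===== PRECONDITION & SPEC =====
def Spec_add_parity (dna : String) (out : String × List Int) : Prop := out = add_parity_alt dna
instance (dna : String) (out : String × List Int) : Decidable (Spec_add_parity dna out) := by unfold Spec_add_parity; infer_instance

-- ===== CLAIM (what is proved, stated in full; the proofs are below) =====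
def Claim_equal_add_parity : Prop := ∀ (dna : String), Dom_add_parity dna → Spec_add_parity dna (add_parity dna)

-- ===== LEMMAS AND PROOFS =====

-- GC test and block parity used by the common specification
def isGC (c : Char) : Bool := decide (c = 'G' ∨ c = 'C')

def bodd (u : List Char) : Bool := u.countP isGC % 2 == 1

-- common specification: the flattened blocks (each followed by its parity base)
-- and the parity positions, starting at output position `pos`
def chunksF (s : List Char) (pos : Int) : List Char × List Int :=
  if h : s = [] then ([], [])
  else
    let b := s.take 8
    let pb : Char := if bodd b then 'T' else 'A'
    let r := chunksF (s.drop 8) (pos + (b.length : Int) + 1)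
    (b ++ pb :: r.1, (pos + (b.length : Int)) :: r.2)
termination_by s.length
decreasing_by
  have hlen : s.length ≠ 0 := fun h0 => h (List.length_eq_zero_iff.mp h0)
  simp only [List.length_drop]
  omega

lemma pyRange8_nil (a b : Int) (h : b ≤ a) : PySem.List.pyRange a b 8 = [] := by
  rw [PySem.List.pyRange_of_pos a b (by norm_num)]
  simp [show ¬ a < b by omega]

lemma pyRange8_cons (a b : Int) (h : a < b) :
    PySem.List.pyRange a b 8 = a :: PySem.List.pyRange (a + 8) b 8 := by
  rw [PySem.List.pyRange_of_pos a b (by norm_num),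
      PySem.List.pyRange_of_pos (a+8) b (by norm_num)]
  have hm : ((b - a + 8 - 1) / 8).toNat =
      (if a + 8 < b then ((b - (a+8) + 8 - 1) / 8).toNat else 0) + 1 := by
    split_ifs with h2 <;> omega
  rw [if_pos h, hm, List.range_succ_eq_map, List.map_cons, List.map_map]
  congr 1
  · simp
  · apply List.map_congr_left
    intro k _
    simp only [Function.comp_apply]
    push_cast
    ring

lemma join_nil_eq_flatten (xs : List (List Char)) : PySem.Chars.join [] xs = xs.flatten := by
  simp only [PySem.Chars.join, List.intercalate]
  induction xs with
  | nil => simp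
  | cons a t ih => cases t <;> simp_all [List.intersperse]

-- aGC counts the G/C characters
lemma aGC_eq_countP (u : List Char) : aGC u = (u.countP isGC : Int) := by
  suffices h : ∀ (acc : Int) (u : List Char),
      u.foldl (fun acc b => if b = 'G' ∨ b = 'C' then acc + 1 else acc) acc
        = acc + (u.countP isGC : Int) by
    simpa using h 0 u
  intro acc u
  induction u generalizing acc with
  | nil => simp
  | cons c t ih =>
    simp only [List.foldl_cons, List.countP_cons, ih, isGC]
    by_cases hc : c = 'G' ∨ c = 'C' <;> simp [hc] <;> push_cast <;> ring

-- A's parity base for a block is chunksF's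
lemma parity_base_eq (u : List Char) :
    (if PySem.Int.mod (aGC u) 2 = 0 then (['A'] : List Char) else ['T'])
      = [if bodd u then 'T' else 'A'] := by
  rw [aGC_eq_countP]
  have hmod : PySem.Int.mod ((u.countP isGC : Nat) : Int) 2
      = (((u.countP isGC) % 2 : Nat) : Int) := by
    unfold PySem.Int.mod
    rw [Int.fmod_eq_emod, if_pos (Or.inl (by norm_num)), add_zero]
    push_cast
    rfl
  rw [hmod]
  rcases Nat.mod_two_eq_zero_or_one (u.countP isGC) with h | h <;>
    simp [h, bodd]

-- ===== A equals the common specification =====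
lemma lemA (s : List Char) : ∀ (m k : Nat), s.length - k ≤ m →
    ∀ (res : List (List Char)) (poss : List Int) (pos : Int),
    (let st := (PySem.List.pyRange (k : Int) (s.length : Int) 8).foldl (aStep s) (res, poss, pos);
     (PySem.Chars.join [] st.1, st.2.1))
      = (PySem.Chars.join [] res ++ (chunksF (s.drop k) pos).1,
         poss ++ (chunksF (s.drop k) pos).2) := by
  intro m
  induction m with
  | zero =>
    intro k hk res poss pos
    have hge : s.length ≤ k := by omega
    rw [pyRange8_nil _ _ (by exact_mod_cast hge)]
    rw [List.drop_eq_nil_of_le hge]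
    simp [chunksF]
  | succ m ih =>
    intro k hk res poss pos
    by_cases hlt : k < s.length
    · rw [pyRange8_cons _ _ (by exact_mod_cast hlt)]
      simp only [List.foldl_cons]
      have hstep : aStep s (res, poss, pos) (k : Int)
          = (res ++ [(s.drop k).take 8] ++ [[if bodd ((s.drop k).take 8) then 'T' else 'A']],
             poss ++ [pos + (((s.drop k).take 8).length : Int)],
             pos + (((s.drop k).take 8).length : Int) + 1) := by
        show (_, _, _) = _
        have hsl : PySem.List.slice s (some (k : Int)) (some ((k : Int) + 8))
            = (s.drop k).take 8 := by
          have := PySem.List.slice_natCast (xs := s) (a := k) (b := k + 8)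
          push_cast at this
          simpa using this
        rw [hsl, parity_base_eq]
      rw [hstep]
      have h8 : ((k : Int) + 8) = ((k + 8 : Nat) : Int) := by push_cast; ring
      rw [h8]
      rw [ih (k + 8) (by omega)]
      have hne : s.drop k ≠ [] := by
        intro h; rw [List.drop_eq_nil_iff] at h; omega
      conv_rhs => rw [chunksF]
      rw [dif_neg hne]
      simp [join_nil_eq_flatten, List.take_drop]
    · have hge : s.length ≤ k := by omega
      rw [pyRange8_nil _ _ (by exact_mod_cast hge)]
      rw [List.drop_eq_nil_of_le hge]
      simp [chunksF]

-- ===== B equals the common specification =====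
lemma bodd_cons (c : Char) (t : List Char) :
    bodd (c :: t) = (if c = 'G' ∨ c = 'C' then !(bodd t) else bodd t) := by
  simp only [bodd, List.countP_cons, isGC]
  by_cases h : c = 'G' ∨ c = 'C'
  · rw [if_pos h]
    simp only [h, decide_true, if_pos]
    rcases Nat.mod_two_eq_zero_or_one (t.countP isGC) with h2 | h2 <;>
      simp [Nat.add_mod, h2]
  · rw [if_neg h]
    simp [h]

lemma odd_step (c : Char) (t : List Char) (odd : Bool) :
    ((if c = 'G' ∨ c = 'C' then !odd else odd) ^^ bodd t) = (odd ^^ bodd (c :: t)) := by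
  rw [bodd_cons]
  by_cases hgc : c = 'G' ∨ c = 'C'
  · rw [if_pos hgc, if_pos hgc]
    cases odd <;> cases bodd t <;> rfl
  · rw [if_neg hgc, if_neg hgc]

lemma odd_step1 (c : Char) (odd : Bool) :
    (if c = 'G' ∨ c = 'C' then !odd else odd) = (odd ^^ bodd [c]) := by
  have h := odd_step c [] odd
  simpa [bodd] using h

lemma bGo_chunk : ∀ (u : List Char) (rest out : List Char) (poss : List Int) (odd : Bool) (cnt : Int),
    0 ≤ cnt → cnt + (u.length : Int) = 8 → u ≠ [] →
    bGo (u ++ rest) out poss odd cnt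
      = bGo rest (out ++ u ++ [if odd ^^ bodd u then 'T' else 'A'])
          (poss ++ [(out.length : Int) + (u.length : Int)]) false 0 := by
  intro u
  induction u with
  | nil => intro _ _ _ _ _ _ _ h; exact absurd rfl h
  | cons c t ih =>
    intro rest out poss odd cnt h0 h8 _
    by_cases ht : t = []
    · subst ht
      simp only [List.length_cons, List.length_nil] at h8
      have hc : cnt = 7 := by push_cast at h8; omega
      subst hc
      simp only [List.cons_append, List.nil_append, bGo]
      rw [if_pos (by norm_num)]
      rw [odd_step1 c odd]
      have e3 : (((out ++ [c] ++ [if (odd ^^ bodd [c]) then 'T' else 'A']).length : Nat) : Int) - 1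
          = (out.length : Int) + ((([c] : List Char).length : Nat) : Int) := by
        simp only [List.length_append, List.length_cons, List.length_nil]
        push_cast
        ring
      rw [e3]
    · have htlen : 0 < t.length := List.length_pos_iff.mpr ht
      simp only [List.cons_append, bGo]
      rw [if_neg (by simp at h8; push_cast at h8 ⊢; omega)]
      rw [ih rest (out ++ [c]) poss _ (cnt + 1) (by omega)
            (by simp at h8 ⊢; push_cast at h8 ⊢; omega) ht]
      rw [odd_step c t odd]
      have e1 : out ++ [c] ++ t = out ++ c :: t := by simp
      have e2 : (((out ++ [c]).length : Nat) : Int) + (t.length : Int)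
          = (out.length : Int) + (((c :: t).length : Nat) : Int) := by
        simp only [List.length_append, List.length_cons, List.length_nil]
        push_cast
        ring
      rw [e1, e2]

lemma bGo_tail : ∀ (u out : List Char) (poss : List Int) (odd : Bool) (cnt : Int),
    0 ≤ cnt → cnt + (u.length : Int) < 8 → 0 < cnt + (u.length : Int) →
    bGo u out poss odd cnt
      = (out ++ u ++ [if odd ^^ bodd u then 'T' else 'A'],
         poss ++ [(out.length : Int) + (u.length : Int)]) := by
  intro u
  induction u with
  | nil =>
    intro out poss odd cnt h0 hlt hpos
    simp only [List.length_nil, Nat.cast_zero, add_zero] at hlt hpos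
    simp only [bGo]
    rw [if_pos (by omega)]
    refine Prod.ext ?_ ?_
    · simp [bodd]
    · simp
  | cons c t ih =>
    intro out poss odd cnt h0 hlt hpos
    simp only [bGo]
    rw [if_neg (by simp at hlt; push_cast at hlt ⊢; omega)]
    rw [ih (out ++ [c]) poss _ (cnt + 1) (by omega)
          (by simp at hlt ⊢; push_cast at hlt ⊢; omega) (by push_cast; omega)]
    rw [odd_step c t odd]
    have e1 : out ++ [c] ++ t = out ++ c :: t := by simp
    have e2 : (((out ++ [c]).length : Nat) : Int) + (t.length : Int)
        = (out.length : Int) + (((c :: t).length : Nat) : Int) := by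
      simp only [List.length_append, List.length_cons, List.length_nil]
      push_cast
      ring
    rw [e1, e2]

lemma lemB : ∀ (m : Nat) (t : List Char), t.length ≤ m →
    ∀ (out : List Char) (poss : List Int),
    bGo t out poss false 0
      = (out ++ (chunksF t (out.length : Int)).1,
         poss ++ (chunksF t (out.length : Int)).2) := by
  intro m
  induction m with
  | zero =>
    intro t ht out poss
    have : t = [] := List.length_eq_zero_iff.mp (by omega)
    subst this
    simp [bGo, chunksF]
  | succ m ih =>
    intro t ht out poss
    by_cases hnil : t = []
    · subst hnil; simp [bGo, chunksF]
    · by_cases h8 : 8 ≤ t.length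
      · have hsplit : t = t.take 8 ++ t.drop 8 := (List.take_append_drop 8 t).symm
        have hlen : (t.take 8).length = 8 := by simp [List.length_take]; omega
        conv_lhs => rw [hsplit]
        rw [bGo_chunk (t.take 8) (t.drop 8) out poss false 0 le_rfl
              (by rw [hlen]; norm_num)
              (by intro h; have := congrArg List.length h; simp [hlen] at this)]
        rw [ih (t.drop 8) (by simp [List.length_drop]; omega)]
        conv_rhs => rw [chunksF]
        rw [dif_neg hnil]
        simp only [Bool.false_xor]
        have harg : (((out ++ t.take 8 ++ [if bodd (t.take 8) then 'T' else 'A']).length : Nat) : Int)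
            = (out.length : Int) + (((t.take 8).length : Nat) : Int) + 1 := by
          simp only [List.length_append, List.length_cons, List.length_nil]
          push_cast
          ring
        rw [harg]
        refine Prod.ext ?_ ?_
        · simp [List.append_assoc]
        · simp [List.append_assoc]
      · have hlen : t.length < 8 := by omega
        have hpos : 0 < t.length := List.length_pos_iff.mpr hnil
        rw [bGo_tail t out poss false 0 le_rfl (by push_cast; omega)
              (by push_cast; omega)]
        conv_rhs => rw [chunksF]
        rw [dif_neg hnil]
        have htake : t.take 8 = t := List.take_of_length_le (by omega)
        have hdrop : t.drop 8 = [] := List.drop_eq_nil_of_le (by omega)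
        rw [htake, hdrop]
        simp [chunksF]

-- ===== VERDICT (by name: the statement is the Claim_ definition above) =====
theorem add_parity_spec : Claim_equal_add_parity := by
  intro dna _
  unfold Spec_add_parity add_parity add_parity_alt
  simp only [PySem.Str.len_eq]
  have hA := lemA dna.toList dna.toList.length 0 (by omega) [] [] 0
  have hB := lemB dna.toList.length dna.toList le_rfl [] []
  simp only [Nat.cast_zero, List.drop_zero, List.length_nil, List.nil_append,
    join_nil_eq_flatten, List.flatten_nil] at hA hB
  rw [Prod.ext_iff] at hA
  rw [hB]
  simp only [join_nil_eq_flatten]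
  exact Prod.ext (congrArg String.ofList hA.1) hA.2
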